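-- pv_equiv track=rewrite | github.com/rawalkhirodkar/multipose2body | openpose_pytorch/create_stick_figures.py | check_if_keypoints_in_bb
-- ===== SOURCE A (Python) =====
-- def check_if_keypoints_in_bb(manual_bbox, keypoints):
--     npoints_inside = 0
--     zero_points = 0 # invalid points
--     top_width, top_height, width, height = manual_bbox
--     nkeypoints = len(keypoints)//3
--
--     # pdb.set_trace()
--     for idx in range(nkeypoints):
--         if keypoints[idx*3] == 0 and keypoints[idx*3] == 0:
--             zero_points += 1
--         elif keypoints[idx*3] >= top_width and keypoints[idx*3] <= top_width + width and keypoints[idx*3+1]  >= top_height and keypoints[idx*3+1] <= top_height + height: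
--             npoints_inside += 1
--
--     # pdb.set_trace()
--     if npoints_inside == nkeypoints-zero_points:
--         return True
--     else:
--         return False
-- ===== SOURCE B (Python) =====
-- def check_if_keypoints_in_bb(manual_bbox, keypoints):
--     top_width, top_height, width, height = manual_bbox
--     ks = keypoints
--     while len(ks) >= 3:
--         x, y = ks[0], ks[1]
--         if x != 0 and not (top_width <= x <= top_width + width and top_height <= y <= top_height + height):
--             return False
--         ks = ks[3:]
--     return True
-- ===== Notes on version B (the rewrite author's own statement) =====
-- stated objective: simpler
-- what changed: Replaced the two counters (points-inside and zero-points) plus a final count comparison by a short-circuit universal check that walks the flat keypoint list in chunks of three and returns False as soon as a valid (x!=0) point lies outside the box.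
import Mathlib
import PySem

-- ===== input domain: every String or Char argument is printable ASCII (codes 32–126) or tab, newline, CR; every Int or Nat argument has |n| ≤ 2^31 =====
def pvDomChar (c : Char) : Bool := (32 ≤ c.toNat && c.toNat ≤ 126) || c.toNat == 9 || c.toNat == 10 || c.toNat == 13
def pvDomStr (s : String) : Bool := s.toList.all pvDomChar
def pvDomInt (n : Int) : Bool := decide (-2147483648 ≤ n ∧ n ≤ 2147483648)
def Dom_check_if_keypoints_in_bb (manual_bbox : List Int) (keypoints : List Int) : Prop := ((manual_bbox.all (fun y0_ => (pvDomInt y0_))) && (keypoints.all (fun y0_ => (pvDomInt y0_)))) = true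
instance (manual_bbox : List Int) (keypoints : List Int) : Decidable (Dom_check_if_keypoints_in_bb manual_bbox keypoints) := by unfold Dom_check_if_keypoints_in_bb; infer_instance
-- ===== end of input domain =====

-- B replaces A's two counters and final count comparison by a short-circuit
-- "all valid points inside" chunk walk (objective: simpler).

-- ===== PORT A =====
-- For idx < keypoints.length / 3 the indices idx*3 and idx*3+1 are nonnegative
-- and in range, so plain List.getD is exact for Python's keypoints[idx*3] here.
def check_if_keypoints_in_bb (manual_bbox : List Int) (keypoints : List Int) : Bool :=
  -- Python's 4-way unpack: arity check, then the four components
  if manual_bbox.length = 4 then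
    let top_width := manual_bbox.getD 0 0
    let top_height := manual_bbox.getD 1 0
    let width := manual_bbox.getD 2 0
    let height := manual_bbox.getD 3 0
    let nkeypoints : Nat := keypoints.length / 3
    let s : Int × Int := (List.range nkeypoints).foldl
      (fun (s : Int × Int) (idx : Nat) =>
        if keypoints.getD (idx*3) 0 == 0 && keypoints.getD (idx*3) 0 == 0 then
          (s.1, s.2 + 1)
        else if keypoints.getD (idx*3) 0 ≥ top_width &&
                keypoints.getD (idx*3) 0 ≤ top_width + width &&
                keypoints.getD (idx*3+1) 0 ≥ top_height &&
                keypoints.getD (idx*3+1) 0 ≤ top_height + height then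
          (s.1 + 1, s.2)
        else s) (0, 0)
    decide (s.1 = (nkeypoints : Int) - s.2)
  else false  -- fewer/more than 4 bbox values: Python raises ValueError (outside Pre_)

-- ===== PORT B =====
def pvGoB (top_width top_height width height : Int) : List Int → Bool
  | x :: y :: _ :: rest =>
    if x ≠ 0 ∧ ¬(top_width ≤ x ∧ x ≤ top_width + width ∧
                 top_height ≤ y ∧ y ≤ top_height + height) then
      false
    else pvGoB top_width top_height width height rest
  | _ => true

def check_if_keypoints_in_bb_alt (manual_bbox : List Int) (keypoints : List Int) : Bool :=
  if manual_bbox.length = 4 then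
    pvGoB (manual_bbox.getD 0 0) (manual_bbox.getD 1 0) (manual_bbox.getD 2 0)
          (manual_bbox.getD 3 0) keypoints
  else false  -- fewer/more than 4 bbox values: Python raises ValueError (outside Pre_)

-- ===== PRECONDITION & SPEC =====
-- Python A unpacks manual_bbox into exactly four values and raises ValueError otherwise.
def Pre_check_if_keypoints_in_bb (manual_bbox : List Int) (keypoints : List Int) : Prop :=
  manual_bbox.length = 4
instance (manual_bbox : List Int) (keypoints : List Int) : Decidable (Pre_check_if_keypoints_in_bb manual_bbox keypoints) := by unfold Pre_check_if_keypoints_in_bb; infer_instance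

def pvWitness_check_if_keypoints_in_bb : List Int × List Int := ([0, 0, 10, 10], [5, 5, 2, 0, 9, 1])

def Spec_check_if_keypoints_in_bb (manual_bbox : List Int) (keypoints : List Int) (out : Bool) : Prop := out = check_if_keypoints_in_bb_alt manual_bbox keypoints
instance (manual_bbox : List Int) (keypoints : List Int) (out : Bool) : Decidable (Spec_check_if_keypoints_in_bb manual_bbox keypoints out) := by unfold Spec_check_if_keypoints_in_bb; infer_instance

-- ===== CLAIM (what is proved, stated in full; the proofs are below) =====
def Claim_equal_check_if_keypoints_in_bb : Prop := ∀ (manual_bbox : List Int) (keypoints : List Int), Dom_check_if_keypoints_in_bb manual_bbox keypoints → Pre_check_if_keypoints_in_bb manual_bbox keypoints → Spec_check_if_keypoints_in_bb manual_bbox keypoints (check_if_keypoints_in_bb manual_bbox keypoints)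

-- ===== LEMMAS AND PROOFS =====

-- "point idx is zero" / "point idx is inside the box" / their disjunction, as Booleans
def pvZb (kp : List Int) (i : Nat) : Bool := kp.getD (i*3) 0 == 0
def pvInb (tw th w h : Int) (kp : List Int) (i : Nat) : Bool :=
  kp.getD (i*3) 0 ≥ tw && kp.getD (i*3) 0 ≤ tw + w &&
  kp.getD (i*3+1) 0 ≥ th && kp.getD (i*3+1) 0 ≤ th + h
def pvIb (tw th w h : Int) (kp : List Int) (i : Nat) : Bool :=
  !pvZb kp i && pvInb tw th w h kp i
def pvCb (tw th w h : Int) (kp : List Int) (i : Nat) : Bool :=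
  pvZb kp i || pvInb tw th w h kp i

lemma pvFoldA (tw th w h : Int) (kp : List Int) (n : Nat) :
    (List.range n).foldl
      (fun (s : Int × Int) (idx : Nat) =>
        if kp.getD (idx*3) 0 == 0 && kp.getD (idx*3) 0 == 0 then
          (s.1, s.2 + 1)
        else if kp.getD (idx*3) 0 ≥ tw && kp.getD (idx*3) 0 ≤ tw + w &&
                kp.getD (idx*3+1) 0 ≥ th && kp.getD (idx*3+1) 0 ≤ th + h then
          (s.1 + 1, s.2)
        else s) (0, 0)
    = (((List.range n).countP (pvIb tw th w h kp) : Int),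
       ((List.range n).countP (pvZb kp) : Int)) := by
  induction n with
  | zero => simp
  | succ n ih =>
    rw [List.range_succ, List.foldl_append, List.countP_append, List.countP_append, ih]
    simp only [List.foldl_cons, List.foldl_nil, List.countP_cons, List.countP_nil]
    by_cases h1 : pvZb kp n = true
    · simp [pvZb, pvIb] at h1 ⊢
      simp [h1]
    · by_cases h2 : pvInb tw th w h kp n = true
      · simp [pvZb, pvInb, pvIb] at h1 h2 ⊢
        simp [h1, h2]
      · simp [pvZb, pvInb, pvIb] at h1 h2 ⊢
        simp only [h1]
        rw [if_neg, if_neg, if_neg] <;> simp [h1] <;> omega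
  
lemma pvCountSplit (tw th w h : Int) (kp : List Int) (l : List Nat) :
    l.countP (pvIb tw th w h kp) + l.countP (pvZb kp)
      = l.countP (pvCb tw th w h kp) := by
  induction l with
  | nil => simp
  | cons a l ih =>
    simp only [List.countP_cons]
    by_cases hz : pvZb kp a = true
    · simp [pvIb, pvCb, hz]; omega
    · by_cases hi : pvInb tw th w h kp a = true
      · simp [pvIb, pvCb, hz, hi, ← ih]; omega
      · simp [pvIb, pvCb, hz, hi, ← ih]

lemma pvA_iff (tw th w h : Int) (kp : List Int) :
    check_if_keypoints_in_bb [tw, th, w, h] kp = true ↔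
      ∀ i < kp.length / 3, pvCb tw th w h kp i = true := by
  unfold check_if_keypoints_in_bb
  rw [if_pos (by simp)]
  dsimp only
  simp only [show ([tw, th, w, h] : List Int).getD 0 0 = tw from rfl,
    show ([tw, th, w, h] : List Int).getD 1 0 = th from rfl,
    show ([tw, th, w, h] : List Int).getD 2 0 = w from rfl,
    show ([tw, th, w, h] : List Int).getD 3 0 = h from rfl]
  rw [pvFoldA]
  have hle : (List.range (kp.length / 3)).countP (pvCb tw th w h kp)
      ≤ kp.length / 3 := by
    simpa using List.countP_le_length (l := List.range (kp.length / 3))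
      (p := pvCb tw th w h kp)
  rw [← pvCountSplit] at hle
  constructor
  · intro hA
    have h1 : (List.range (kp.length / 3)).countP (pvIb tw th w h kp)
        + (List.range (kp.length / 3)).countP (pvZb kp) = kp.length / 3 := by
      simp only [decide_eq_true_eq] at hA
      omega
    rw [pvCountSplit] at h1
    have := (List.countP_eq_length (l := List.range (kp.length / 3))
      (p := pvCb tw th w h kp)).mp (by simpa using h1)
    intro i hi
    exact this i (List.mem_range.mpr hi)
  · intro hC
    have h1 : (List.range (kp.length / 3)).countP (pvCb tw th w h kp)
        = kp.length / 3 := by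
      have := (List.countP_eq_length (l := List.range (kp.length / 3))
        (p := pvCb tw th w h kp)).mpr (fun i hi => hC i (List.mem_range.mp hi))
      simpa using this
    rw [← pvCountSplit] at h1
    simp only [decide_eq_true_eq]
    omega

lemma pvCb_zero (tw th w h x y z : Int) (rest : List Int) :
    pvCb tw th w h (x :: y :: z :: rest) 0 = true ↔
      (x = 0 ∨ (tw ≤ x ∧ x ≤ tw + w ∧ th ≤ y ∧ y ≤ th + h)) := by
  simp only [pvCb, pvZb, pvInb]
  simp
  tauto

lemma pvCb_succ (tw th w h x y z : Int) (rest : List Int) (i : Nat) :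
    pvCb tw th w h (x :: y :: z :: rest) (i+1) = pvCb tw th w h rest i := by
  have h1 : (i+1)*3 = i*3+1+1+1 := by ring
  have h2 : (i+1)*3+1 = i*3+1+1+1+1 := by ring
  simp [pvCb, pvZb, pvInb, h1]

lemma pvB_iff (tw th w h : Int) (kp : List Int) :
    pvGoB tw th w h kp = true ↔
      ∀ i < kp.length / 3, pvCb tw th w h kp i = true := by
  induction kp using pvGoB.induct tw th w h with
  | case1 x y z rest hcond =>
    rw [pvGoB, if_pos hcond]
    have hlen : (x :: y :: z :: rest).length / 3 = rest.length / 3 + 1 := by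
      simp [List.length_cons]; omega
    constructor
    · intro hfalse; cases hfalse
    · intro hall
      exfalso
      have h0 := (pvCb_zero tw th w h x y z rest).mp (hall 0 (by omega))
      obtain ⟨hx, hbox⟩ := hcond
      rcases h0 with h0 | h0
      · exact hx h0
      · exact hbox h0
  | case2 x y z rest hcond ih =>
    rw [pvGoB, if_neg hcond, ih]
    have hlen : (x :: y :: z :: rest).length / 3 = rest.length / 3 + 1 := by
      simp [List.length_cons]; omega
    have hc0 : pvCb tw th w h (x :: y :: z :: rest) 0 = true := by
      rw [pvCb_zero]
      by_cases hx : x = 0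
      · exact Or.inl hx
      · right
        by_contra hbox
        exact hcond ⟨hx, hbox⟩
    constructor
    · intro hall i hi
      match i with
      | 0 => exact hc0
      | i + 1 =>
        rw [pvCb_succ]
        exact hall i (by omega)
    · intro hall i hi
      rw [← pvCb_succ tw th w h x y z rest i]
      exact hall (i+1) (by omega)
  | case3 t h3 =>
    have hlen : t.length < 3 := by
      match t with
      | [] => simp
      | [a] => simp
      | [a, b] => simp
      | a :: b :: c :: r => exact absurd rfl (h3 a b c r)
    have hgo : pvGoB tw th w h t = true := by
      rw [pvGoB.eq_def]
      match t with
      | [] => rfl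
      | [a] => rfl
      | [a, b] => rfl
      | a :: b :: c :: r => exact absurd rfl (h3 a b c r)
    rw [hgo]
    constructor
    · intro _ i hi
      omega
    · intro _; rfl

-- ===== VERDICT (by name: the statement is the Claim_ definition above) =====
theorem check_if_keypoints_in_bb_spec : Claim_equal_check_if_keypoints_in_bb := by
  intro bb kp _ hpre
  unfold Spec_check_if_keypoints_in_bb
  match bb, hpre with
  | [tw, th, w, h], _ =>
    unfold check_if_keypoints_in_bb_alt
    simp only [List.length_cons, List.length_nil, if_pos, List.getD]
    rw [Bool.eq_iff_iff, pvA_iff, ← pvB_iff]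
    simp [List.getD]
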